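-- pv_equiv track=rewrite | github.com/jaryeonge/horovod_multiple_node | deep_learning/utils/data_utils.py | eng_to_kor
-- ===== SOURCE A (Python) =====
-- def eng_to_kor(text):
--     eng_dic = {'A': '에이',
--                'B': '비',
--                'C': '씨',
--                'D': '디',
--                'E': '이',
--                'F': '에프',
--                'G': '지',
--                'H': '에이치',
--                'I': '아이',
--                'J': '제이',
--                'K': '케이',
--                'L': '엘',
--                'M': '엠',
--                'N': '엔',
--                'O': '오',
--                'P': '피',
--                'Q': '큐',
--                'R': '알',
--                'S': '에스',
--                'T': '티',
--                'U': '유',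
--                'V': '브이',
--                'W': '더블유',
--                'X': '엑스',
--                'Y': '와이',
--                'Z': '제트'}
--     measure_dic = {'kg': '킬로그램',
--                    'km': '킬로미터',
--                    'mm': '미리미터'}
--
--     for k, v in measure_dic.items():
--         text = text.replace(k, v)
--
--     for k, v in eng_dic.items():
--         text = text.replace(k, v)
--         text = text.replace(k.lower(), v)
--
--     return text
-- ===== SOURCE B (Python) =====
-- def eng_to_kor(text):
--     measure = {'kg': '킬로그램', 'km': '킬로미터', 'mm': '미리미터'}
--     base = {'A': '에이', 'B': '비', 'C': '씨', 'D': '디', 'E': '이', 'F': '에프',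
--             'G': '지', 'H': '에이치', 'I': '아이', 'J': '제이', 'K': '케이', 'L': '엘',
--             'M': '엠', 'N': '엔', 'O': '오', 'P': '피', 'Q': '큐', 'R': '알',
--             'S': '에스', 'T': '티', 'U': '유', 'V': '브이', 'W': '더블유', 'X': '엑스',
--             'Y': '와이', 'Z': '제트'}
--     letters = {}
--     for k, v in base.items():
--         letters[k] = v
--         letters[k.lower()] = v
--     out = []
--     i = 0
--     n = len(text)
--     while i < n:
--         two = text[i:i + 2]
--         if two in measure:
--             out.append(measure[two])
--             i += 2
--         else:
--             ch = text[i]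
--             out.append(letters.get(ch, ch))
--             i += 1
--     return ''.join(out)
-- ===== Notes on version B (the rewrite author's own statement) =====
-- stated objective: alternative
-- what changed: A runs 53 sequential whole-string replace passes (3 measure keys, then each letter in upper and lower case); B builds one combined measure/letter lookup and makes a single left-to-right positional pass, trying the 2-char measure slice first and the single-char letter mapping otherwise.
import Mathlib
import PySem

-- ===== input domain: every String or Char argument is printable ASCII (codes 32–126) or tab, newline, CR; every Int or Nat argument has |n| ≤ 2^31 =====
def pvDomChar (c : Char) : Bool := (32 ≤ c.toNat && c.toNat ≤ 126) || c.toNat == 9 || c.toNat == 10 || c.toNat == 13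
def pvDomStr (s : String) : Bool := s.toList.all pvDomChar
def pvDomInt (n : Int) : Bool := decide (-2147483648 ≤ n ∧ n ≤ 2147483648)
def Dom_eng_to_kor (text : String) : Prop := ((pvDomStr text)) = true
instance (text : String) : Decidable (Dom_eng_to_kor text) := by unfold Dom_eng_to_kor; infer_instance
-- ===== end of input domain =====

set_option maxRecDepth 4000


-- B replaces A's 53 sequential whole-string replace passes by one left-to-right scan that
-- matches the two-char measure table first, then the letter table, at each position (alternative
-- single-pass algorithm; same result, not measured faster).

-- ===== PORT A =====
-- the measure dict (insertion order kg, km, mm), as a char-list association list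
def measureTblA : List (List Char × List Char) :=
  [(['k', 'g'], ['킬', '로', '그', '램']),
   (['k', 'm'], ['킬', '로', '미', '터']),
   (['m', 'm'], ['미', '리', '미', '터'])]

-- the eng dict (single-char uppercase keys, insertion order A..Z)
def engTblA : List (Char × List Char) :=
  [('A', ['에', '이']),
   ('B', ['비']),
   ('C', ['씨']),
   ('D', ['디']),
   ('E', ['이']),
   ('F', ['에', '프']),
   ('G', ['지']),
   ('H', ['에', '이', '치']),
   ('I', ['아', '이']),
   ('J', ['제', '이']),
   ('K', ['케', '이']),
   ('L', ['엘']),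
   ('M', ['엠']),
   ('N', ['엔']),
   ('O', ['오']),
   ('P', ['피']),
   ('Q', ['큐']),
   ('R', ['알']),
   ('S', ['에', '스']),
   ('T', ['티']),
   ('U', ['유']),
   ('V', ['브', '이']),
   ('W', ['더', '블', '유']),
   ('X', ['엑', '스']),
   ('Y', ['와', '이']),
   ('Z', ['제', '트'])]

-- A: for each measure key replace it everywhere; then for each letter replace the key and its
-- lowercase form everywhere (str.replace = PySem.Chars.replace on the char list).
def eng_to_kor (text : String) : String :=
  String.ofList
    (engTblA.foldl
      (fun acc kv =>
        PySem.Chars.replace (PySem.Chars.replace acc [kv.1] kv.2) (PySem.Chars.lower [kv.1]) kv.2)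
      (measureTblA.foldl (fun acc kv => PySem.Chars.replace acc kv.1 kv.2) text.toList))

-- ===== PORT B =====
-- letters.get(ch, ch): the combined letter dict holding each letter in both cases
def bLetter (c : Char) : List Char :=
  if c = 'A' ∨ c = 'a' then ['에', '이']
  else if c = 'B' ∨ c = 'b' then ['비']
  else if c = 'C' ∨ c = 'c' then ['씨']
  else if c = 'D' ∨ c = 'd' then ['디']
  else if c = 'E' ∨ c = 'e' then ['이']
  else if c = 'F' ∨ c = 'f' then ['에', '프']
  else if c = 'G' ∨ c = 'g' then ['지']
  else if c = 'H' ∨ c = 'h' then ['에', '이', '치']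
  else if c = 'I' ∨ c = 'i' then ['아', '이']
  else if c = 'J' ∨ c = 'j' then ['제', '이']
  else if c = 'K' ∨ c = 'k' then ['케', '이']
  else if c = 'L' ∨ c = 'l' then ['엘']
  else if c = 'M' ∨ c = 'm' then ['엠']
  else if c = 'N' ∨ c = 'n' then ['엔']
  else if c = 'O' ∨ c = 'o' then ['오']
  else if c = 'P' ∨ c = 'p' then ['피']
  else if c = 'Q' ∨ c = 'q' then ['큐']
  else if c = 'R' ∨ c = 'r' then ['알']
  else if c = 'S' ∨ c = 's' then ['에', '스']
  else if c = 'T' ∨ c = 't' then ['티']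
  else if c = 'U' ∨ c = 'u' then ['유']
  else if c = 'V' ∨ c = 'v' then ['브', '이']
  else if c = 'W' ∨ c = 'w' then ['더', '블', '유']
  else if c = 'X' ∨ c = 'x' then ['엑', '스']
  else if c = 'Y' ∨ c = 'y' then ['와', '이']
  else if c = 'Z' ∨ c = 'z' then ['제', '트']
  else [c]

-- measure dict lookup of the two-char slice text[i:i+2]
def bMeasure (c1 c2 : Char) : Option (List Char) :=
  if c1 = 'k' ∧ c2 = 'g' then some ['킬', '로', '그', '램']
  else if c1 = 'k' ∧ c2 = 'm' then some ['킬', '로', '미', '터']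
  else if c1 = 'm' ∧ c2 = 'm' then some ['미', '리', '미', '터']
  else none

-- the while loop: at each position try the 2-char measure slice, else the single letter
def bScan : List Char → List Char
  | [] => []
  | [c] => bLetter c
  | c1 :: c2 :: rest =>
    match bMeasure c1 c2 with
    | some v => v ++ bScan rest
    | none => bLetter c1 ++ bScan (c2 :: rest)

def eng_to_kor_alt (text : String) : String := String.ofList (bScan text.toList)

-- ===== PRECONDITION & SPEC =====
def Spec_eng_to_kor (text : String) (out : String) : Prop := out = eng_to_kor_alt text
instance (text : String) (out : String) : Decidable (Spec_eng_to_kor text out) := by unfold Spec_eng_to_kor; infer_instance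

-- ===== CLAIM (what is proved, stated in full; the proofs are below) =====
def Claim_equal_eng_to_kor : Prop := ∀ (text : String), Dom_eng_to_kor text → Spec_eng_to_kor text (eng_to_kor text)

-- ===== LEMMAS AND PROOFS =====

-- A's measure phase: the three sequential replaces, as one function of the char list
def mPhase (l : List Char) : List Char :=
  measureTblA.foldl (fun acc kv => PySem.Chars.replace acc kv.1 kv.2) l

-- A's letter phase with the lowercase keys evaluated: 52 sequential single-char replaces
def lfTbl : List (Char × List Char) :=
  [('A', ['에', '이']),
   ('a', ['에', '이']),
   ('B', ['비']),
   ('b', ['비']),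
   ('C', ['씨']),
   ('c', ['씨']),
   ('D', ['디']),
   ('d', ['디']),
   ('E', ['이']),
   ('e', ['이']),
   ('F', ['에', '프']),
   ('f', ['에', '프']),
   ('G', ['지']),
   ('g', ['지']),
   ('H', ['에', '이', '치']),
   ('h', ['에', '이', '치']),
   ('I', ['아', '이']),
   ('i', ['아', '이']),
   ('J', ['제', '이']),
   ('j', ['제', '이']),
   ('K', ['케', '이']),
   ('k', ['케', '이']),
   ('L', ['엘']),
   ('l', ['엘']),
   ('M', ['엠']),
   ('m', ['엠']),
   ('N', ['엔']),
   ('n', ['엔']),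
   ('O', ['오']),
   ('o', ['오']),
   ('P', ['피']),
   ('p', ['피']),
   ('Q', ['큐']),
   ('q', ['큐']),
   ('R', ['알']),
   ('r', ['알']),
   ('S', ['에', '스']),
   ('s', ['에', '스']),
   ('T', ['티']),
   ('t', ['티']),
   ('U', ['유']),
   ('u', ['유']),
   ('V', ['브', '이']),
   ('v', ['브', '이']),
   ('W', ['더', '블', '유']),
   ('w', ['더', '블', '유']),
   ('X', ['엑', '스']),
   ('x', ['엑', '스']),
   ('Y', ['와', '이']),
   ('y', ['와', '이']),
   ('Z', ['제', '트']),
   ('z', ['제', '트'])]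

def lPhase (l : List Char) : List Char :=
  lfTbl.foldl (fun acc kv => PySem.Chars.replace acc [kv.1] kv.2) l

lemma lowA : PySem.Chars.lower ['A'] = ['a'] := by decide
lemma lowB : PySem.Chars.lower ['B'] = ['b'] := by decide
lemma lowC : PySem.Chars.lower ['C'] = ['c'] := by decide
lemma lowD : PySem.Chars.lower ['D'] = ['d'] := by decide
lemma lowE : PySem.Chars.lower ['E'] = ['e'] := by decide
lemma lowF : PySem.Chars.lower ['F'] = ['f'] := by decide
lemma lowG : PySem.Chars.lower ['G'] = ['g'] := by decide
lemma lowH : PySem.Chars.lower ['H'] = ['h'] := by decide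
lemma lowI : PySem.Chars.lower ['I'] = ['i'] := by decide
lemma lowJ : PySem.Chars.lower ['J'] = ['j'] := by decide
lemma lowK : PySem.Chars.lower ['K'] = ['k'] := by decide
lemma lowL : PySem.Chars.lower ['L'] = ['l'] := by decide
lemma lowM : PySem.Chars.lower ['M'] = ['m'] := by decide
lemma lowN : PySem.Chars.lower ['N'] = ['n'] := by decide
lemma lowO : PySem.Chars.lower ['O'] = ['o'] := by decide
lemma lowP : PySem.Chars.lower ['P'] = ['p'] := by decide
lemma lowQ : PySem.Chars.lower ['Q'] = ['q'] := by decide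
lemma lowR : PySem.Chars.lower ['R'] = ['r'] := by decide
lemma lowS : PySem.Chars.lower ['S'] = ['s'] := by decide
lemma lowT : PySem.Chars.lower ['T'] = ['t'] := by decide
lemma lowU : PySem.Chars.lower ['U'] = ['u'] := by decide
lemma lowV : PySem.Chars.lower ['V'] = ['v'] := by decide
lemma lowW : PySem.Chars.lower ['W'] = ['w'] := by decide
lemma lowX : PySem.Chars.lower ['X'] = ['x'] := by decide
lemma lowY : PySem.Chars.lower ['Y'] = ['y'] := by decide
lemma lowZ : PySem.Chars.lower ['Z'] = ['z'] := by decide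

lemma eng_to_kor_eq (text : String) :
    eng_to_kor text = String.ofList (lPhase (mPhase text.toList)) := by
  simp only [eng_to_kor, lPhase, mPhase, engTblA, lfTbl, measureTblA,
    List.foldl_cons, List.foldl_nil, lowA, lowB, lowC, lowD, lowE, lowF, lowG, lowH, lowI, lowJ, lowK, lowL, lowM, lowN, lowO, lowP, lowQ, lowR, lowS, lowT, lowU, lowV, lowW, lowX, lowY, lowZ]

-- ----- generic facts about PySem.Chars.replace with a nonempty pattern -----

lemma go_spec (old new : List Char) (ho : old ≠ []) :
    ∀ (fuel : Nat) (l acc : List Char), l.length ≤ fuel →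
      PySem.Chars.replace.go old new fuel l acc = acc.reverse ++ PySem.Chars.replace l old new := by
  intro fuel
  induction fuel using Nat.strong_induction_on with
  | _ fuel ih =>
    match fuel with
    | 0 =>
      intro l acc hl
      have : l = [] := List.eq_nil_of_length_eq_zero (Nat.le_zero.mp hl)
      subst this
      simp [PySem.Chars.replace.go, PySem.Chars.replace, ho]
    | Nat.succ n =>
      intro l acc hl
      cases l with
      | nil => simp [PySem.Chars.replace.go, PySem.Chars.replace, ho]
      | cons c t =>
        have hdrop : ((c :: t).drop old.length).length ≤ t.length := by
          have : 1 ≤ old.length := Nat.one_le_iff_ne_zero.mpr (by simpa using ho)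
          simp only [List.length_drop, List.length_cons]
          omega
        have htn : t.length ≤ n := by simpa using hl
        rw [show PySem.Chars.replace (c :: t) old new
              = PySem.Chars.replace.go old new (c :: t).length (c :: t) [] by
            simp [PySem.Chars.replace, ho]]
        simp only [PySem.Chars.replace.go, List.length_cons]
        by_cases hp : old.isPrefixOf (c :: t)
        · rw [if_pos hp, if_pos hp,
            ih n (by omega) _ _ (le_trans hdrop htn),
            ih t.length (by omega) _ _ hdrop]
          simp
        · rw [if_neg hp, if_neg hp, ih n (by omega) _ _ htn,
            ih t.length (by omega) _ _ (le_refl _)]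
          simp

lemma rep_nil (old new : List Char) (ho : old ≠ []) :
    PySem.Chars.replace [] old new = [] := by
  simp [PySem.Chars.replace, PySem.Chars.replace.go, ho]

lemma rep_pos (old new l : List Char) (ho : old ≠ []) (h : old <+: l) :
    PySem.Chars.replace l old new = new ++ PySem.Chars.replace (l.drop old.length) old new := by
  cases l with
  | nil =>
    exact absurd (List.prefix_nil.mp h) ho
  | cons c t =>
    have hp : old.isPrefixOf (c :: t) := List.isPrefixOf_iff_prefix.mpr h
    have hdrop : ((c :: t).drop old.length).length ≤ t.length := by
      have : 1 ≤ old.length := Nat.one_le_iff_ne_zero.mpr (by simpa using ho)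
      simp only [List.length_drop, List.length_cons]
      omega
    rw [show PySem.Chars.replace (c :: t) old new
          = PySem.Chars.replace.go old new (c :: t).length (c :: t) [] by
        simp [PySem.Chars.replace, ho]]
    simp only [PySem.Chars.replace.go, List.length_cons, if_pos hp]
    rw [go_spec old new ho _ _ _ hdrop]
    simp

lemma rep_neg (old new : List Char) (c : Char) (t : List Char) (ho : old ≠ [])
    (h : ¬ old <+: (c :: t)) :
    PySem.Chars.replace (c :: t) old new = c :: PySem.Chars.replace t old new := by
  have hp : ¬ old.isPrefixOf (c :: t) := fun hb => h (List.isPrefixOf_iff_prefix.mp hb)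
  rw [show PySem.Chars.replace (c :: t) old new
        = PySem.Chars.replace.go old new (c :: t).length (c :: t) [] by
      simp [PySem.Chars.replace, ho]]
  simp only [PySem.Chars.replace.go, List.length_cons, if_neg hp]
  rw [go_spec old new ho _ _ _ (le_refl _)]
  simp

-- single-char pattern: replace is a per-character substitution
lemma rep1 (a : Char) (v : List Char) :
    ∀ l : List Char, PySem.Chars.replace l [a] v
      = l.flatMap (fun c => if c = a then v else [c]) := by
  intro l
  induction l with
  | nil => simp [rep_nil]
  | cons c t ih =>
    by_cases hc : c = a
    · subst hc
      rw [rep_pos [c] v (c :: t) (by simp) (by simp)]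
      simp [ih]
    · rw [rep_neg [a] v c t (by simp) (by intro hp; exact hc ((List.cons_prefix_cons.mp hp).1.symm))]
      simp [ih, hc]

lemma rep1_single (a : Char) (v : List Char) (c : Char) :
    PySem.Chars.replace [c] [a] v = if c = a then v else [c] := by
  rw [rep1]
  by_cases hc : c = a <;> simp [hc]

-- a prefix block whose characters do not occur in the pattern is untouched and unentered
lemma rep_append_disj (old new : List Char) (ho : old ≠ []) :
    ∀ (s l : List Char), (∀ ch ∈ s, ch ∉ old) →
      PySem.Chars.replace (s ++ l) old new = s ++ PySem.Chars.replace l old new := by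
  intro s
  induction s with
  | nil => simp
  | cons c s' ih =>
    intro l hd
    have hnp : ¬ old <+: (c :: (s' ++ l)) := by
      intro hp
      cases old with
      | nil => exact ho rfl
      | cons o os =>
        have := (List.cons_prefix_cons.mp hp).1
        exact (hd c (by simp)) (by simp [this])
    rw [List.cons_append, rep_neg old new _ _ ho hnp, ih l (fun ch hch => hd ch (by simp [hch]))]
    simp

-- heads: a replace with a pattern starting ≠ head and a value whose head is not 'm'
lemma head_rep_ne (old new : List Char) (ho : old ≠ []) (hn : new ≠ [])
    (hh : new.head? ≠ some 'm') (c : Char) (t : List Char)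
    (h : (PySem.Chars.replace (c :: t) old new).head? = some 'm') : c = 'm' := by
  by_cases hp : old <+: (c :: t)
  · rw [rep_pos old new _ ho hp] at h
    rw [List.head?_append] at h
    cases hne : new.head? with
    | none => exact absurd (List.head?_eq_none_iff.mp hne) hn
    | some a =>
      rw [hne] at h
      simp at h
      exact absurd (by rw [hne, h]) hh
  · rw [rep_neg old new c t ho hp] at h
    simpa using h

lemma singleton_prefix_head (b : Char) (l : List Char) (h : [b] <+: l) : l.head? = some b := by
  cases l with
  | nil => simpa using (List.prefix_nil.mp h)
  | cons c t => simp [(List.cons_prefix_cons.mp h).1.symm]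

-- the letter phase is an append homomorphism (all its patterns are single chars)
lemma lPhase_gen_append :
    ∀ (tbl : List (Char × List Char)) (x y : List Char),
      tbl.foldl (fun acc kv => PySem.Chars.replace acc [kv.1] kv.2) (x ++ y)
        = tbl.foldl (fun acc kv => PySem.Chars.replace acc [kv.1] kv.2) x
          ++ tbl.foldl (fun acc kv => PySem.Chars.replace acc [kv.1] kv.2) y := by
  intro tbl
  induction tbl with
  | nil => simp
  | cons kv tbl' ih =>
    intro x y
    simp only [List.foldl_cons]
    rw [rep1, List.flatMap_append, ← rep1, ← rep1, ih]

lemma lPhase_append (x y : List Char) : lPhase (x ++ y) = lPhase x ++ lPhase y :=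
  lPhase_gen_append lfTbl x y

-- on one character, A's 52 replaces agree with B's combined letter lookup
lemma lPhase_single (c : Char) : lPhase [c] = bLetter c := by
  by_cases hc : c ∈ ['A', 'a', 'B', 'b', 'C', 'c', 'D', 'd', 'E', 'e', 'F', 'f', 'G', 'g', 'H', 'h', 'I', 'i', 'J', 'j', 'K', 'k', 'L', 'l', 'M', 'm', 'N', 'n', 'O', 'o', 'P', 'p', 'Q', 'q', 'R', 'r', 'S', 's', 'T', 't', 'U', 'u', 'V', 'v', 'W', 'w', 'X', 'x', 'Y', 'y', 'Z', 'z']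
  · fin_cases hc <;> decide
  · simp only [List.mem_cons, List.not_mem_nil, or_false, not_or] at hc
    obtain ⟨h0, h1, h2, h3, h4, h5, h6, h7, h8, h9, h10, h11, h12, h13, h14, h15, h16, h17, h18, h19, h20, h21, h22, h23, h24, h25, h26, h27, h28, h29, h30, h31, h32, h33, h34, h35, h36, h37, h38, h39, h40, h41, h42, h43, h44, h45, h46, h47, h48, h49, h50, h51⟩ := hc
    simp [lPhase, lfTbl, List.foldl_cons, List.foldl_nil, rep1_single, bLetter,
      h0, h1, h2, h3, h4, h5, h6, h7, h8, h9, h10, h11, h12, h13, h14, h15, h16, h17, h18, h19, h20, h21, h22, h23, h24, h25, h26, h27, h28, h29, h30, h31, h32, h33, h34, h35, h36, h37, h38, h39, h40, h41, h42, h43, h44, h45, h46, h47, h48, h49, h50, h51]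

-- the measure phase written out
lemma mPhase_eq (l : List Char) :
    mPhase l = PySem.Chars.replace
      (PySem.Chars.replace (PySem.Chars.replace l ['k', 'g'] ['킬', '로', '그', '램'])
        ['k', 'm'] ['킬', '로', '미', '터'])
      ['m', 'm'] ['미', '리', '미', '터'] := rfl

lemma disj_kg_km : ∀ ch ∈ ['킬', '로', '그', '램'], ch ∉ (['k', 'm'] : List Char) := by simp
lemma disj_kg_mm : ∀ ch ∈ ['킬', '로', '그', '램'], ch ∉ (['m', 'm'] : List Char) := by simp
lemma disj_km_mm : ∀ ch ∈ ['킬', '로', '미', '터'], ch ∉ (['m', 'm'] : List Char) := by simp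

-- main induction: A's two phases equal B's single scan
lemma main_ind : ∀ (n : Nat) (l : List Char), l.length ≤ n → lPhase (mPhase l) = bScan l := by
  intro n
  induction n with
  | zero =>
    intro l hl
    have : l = [] := List.eq_nil_of_length_eq_zero (Nat.le_zero.mp hl)
    subst this
    decide
  | succ n ih =>
    intro l hl
    match l with
    | [] => decide
    | [c] =>
      have h1 : mPhase [c] = [c] := by
        rw [mPhase_eq]
        have h2 : ∀ (a b : Char) (v : List Char),
            PySem.Chars.replace [c] [a, b] v = [c] := by
          intro a b v
          rw [rep_neg [a, b] v c [] (by simp)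
            (by intro hp; have h2 := (List.cons_prefix_cons.mp hp).2; simp [List.prefix_nil] at h2),
            rep_nil _ _ (by simp)]
        rw [h2, h2, h2]
      rw [h1, lPhase_single]
      rfl
    | c1 :: c2 :: rest =>
      have hrest : rest.length ≤ n := by simp at hl; omega
      have hrest2 : (c2 :: rest).length ≤ n := by simp at hl ⊢; omega
      by_cases h1 : c1 = 'k' ∧ c2 = 'g'
      · obtain ⟨rfl, rfl⟩ := h1
        have e1 : PySem.Chars.replace ('k' :: 'g' :: rest) ['k', 'g'] ['킬', '로', '그', '램']
            = ['킬', '로', '그', '램'] ++ PySem.Chars.replace rest ['k', 'g'] ['킬', '로', '그', '램'] := by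
          rw [rep_pos _ _ _ (by simp) (by simp [List.cons_prefix_cons])]
          rfl
        rw [mPhase_eq, e1,
          rep_append_disj _ _ (by simp) _ _ disj_kg_km,
          rep_append_disj _ _ (by simp) _ _ disj_kg_mm,
          lPhase_append, ← mPhase_eq, ih rest hrest]
        have : lPhase ['킬', '로', '그', '램'] = ['킬', '로', '그', '램'] := by decide
        rw [this]
        rfl
      · by_cases h2 : c1 = 'k' ∧ c2 = 'm'
        · obtain ⟨rfl, rfl⟩ := h2
          have e1 : PySem.Chars.replace ('k' :: 'm' :: rest) ['k', 'g'] ['킬', '로', '그', '램']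
              = 'k' :: 'm' :: PySem.Chars.replace rest ['k', 'g'] ['킬', '로', '그', '램'] := by
            rw [rep_neg _ _ _ _ (by simp) (by simp [List.cons_prefix_cons]),
              rep_neg _ _ _ _ (by simp) (by simp [List.cons_prefix_cons])]
          have e2 : PySem.Chars.replace
              ('k' :: 'm' :: PySem.Chars.replace rest ['k', 'g'] ['킬', '로', '그', '램'])
              ['k', 'm'] ['킬', '로', '미', '터']
              = ['킬', '로', '미', '터'] ++ PySem.Chars.replace
                  (PySem.Chars.replace rest ['k', 'g'] ['킬', '로', '그', '램'])
                  ['k', 'm'] ['킬', '로', '미', '터'] := by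
            rw [rep_pos _ _ _ (by simp) (by simp [List.cons_prefix_cons])]
            rfl
          rw [mPhase_eq, e1, e2,
            rep_append_disj _ _ (by simp) _ _ disj_km_mm,
            lPhase_append, ← mPhase_eq, ih rest hrest]
          have : lPhase ['킬', '로', '미', '터'] = ['킬', '로', '미', '터'] := by decide
          rw [this]
          rfl
        · by_cases h3 : c1 = 'm' ∧ c2 = 'm'
          · obtain ⟨rfl, rfl⟩ := h3
            have e1 : PySem.Chars.replace ('m' :: 'm' :: rest) ['k', 'g'] ['킬', '로', '그', '램']
                = 'm' :: 'm' :: PySem.Chars.replace rest ['k', 'g'] ['킬', '로', '그', '램'] := by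
              rw [rep_neg _ _ _ _ (by simp) (by simp [List.cons_prefix_cons]),
                rep_neg _ _ _ _ (by simp) (by simp [List.cons_prefix_cons])]
            have e2 : PySem.Chars.replace
                ('m' :: 'm' :: PySem.Chars.replace rest ['k', 'g'] ['킬', '로', '그', '램'])
                ['k', 'm'] ['킬', '로', '미', '터']
                = 'm' :: 'm' :: PySem.Chars.replace
                    (PySem.Chars.replace rest ['k', 'g'] ['킬', '로', '그', '램'])
                    ['k', 'm'] ['킬', '로', '미', '터'] := by
              rw [rep_neg _ _ _ _ (by simp) (by simp [List.cons_prefix_cons]),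
                rep_neg _ _ _ _ (by simp) (by simp [List.cons_prefix_cons])]
            have e3 : PySem.Chars.replace
                ('m' :: 'm' :: PySem.Chars.replace
                  (PySem.Chars.replace rest ['k', 'g'] ['킬', '로', '그', '램'])
                  ['k', 'm'] ['킬', '로', '미', '터'])
                ['m', 'm'] ['미', '리', '미', '터']
                = ['미', '리', '미', '터'] ++ PySem.Chars.replace
                    (PySem.Chars.replace
                      (PySem.Chars.replace rest ['k', 'g'] ['킬', '로', '그', '램'])
                      ['k', 'm'] ['킬', '로', '미', '터'])
                    ['m', 'm'] ['미', '리', '미', '터'] := by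
              rw [rep_pos _ _ _ (by simp) (by simp [List.cons_prefix_cons])]
              rfl
            rw [mPhase_eq, e1, e2, e3, lPhase_append, ← mPhase_eq, ih rest hrest]
            have : lPhase ['미', '리', '미', '터'] = ['미', '리', '미', '터'] := by decide
            rw [this]
            rfl
          · -- no measure key matches at this position
            have e1 : PySem.Chars.replace (c1 :: c2 :: rest) ['k', 'g'] ['킬', '로', '그', '램']
                = c1 :: PySem.Chars.replace (c2 :: rest) ['k', 'g'] ['킬', '로', '그', '램'] := by
              refine rep_neg _ _ _ _ (by simp) ?_
              intro hp
              rcases List.cons_prefix_cons.mp hp with ⟨hk, hg⟩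
              exact h1 ⟨hk.symm, ((List.cons_prefix_cons.mp hg).1).symm⟩
            have e2 : PySem.Chars.replace
                (c1 :: PySem.Chars.replace (c2 :: rest) ['k', 'g'] ['킬', '로', '그', '램'])
                ['k', 'm'] ['킬', '로', '미', '터']
                = c1 :: PySem.Chars.replace
                    (PySem.Chars.replace (c2 :: rest) ['k', 'g'] ['킬', '로', '그', '램'])
                    ['k', 'm'] ['킬', '로', '미', '터'] := by
              refine rep_neg _ _ _ _ (by simp) ?_
              intro hp
              rcases List.cons_prefix_cons.mp hp with ⟨hk, hm⟩
              have hhd := singleton_prefix_head _ _ hm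
              have hc2 : c2 = 'm' :=
                head_rep_ne _ _ (by simp) (by simp) (by decide) c2 rest hhd
              exact h2 ⟨hk.symm, hc2⟩
            have e3 : PySem.Chars.replace
                (c1 :: PySem.Chars.replace
                  (PySem.Chars.replace (c2 :: rest) ['k', 'g'] ['킬', '로', '그', '램'])
                  ['k', 'm'] ['킬', '로', '미', '터'])
                ['m', 'm'] ['미', '리', '미', '터']
                = c1 :: PySem.Chars.replace
                    (PySem.Chars.replace
                      (PySem.Chars.replace (c2 :: rest) ['k', 'g'] ['킬', '로', '그', '램'])
                      ['k', 'm'] ['킬', '로', '미', '터'])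
                    ['m', 'm'] ['미', '리', '미', '터'] := by
              refine rep_neg _ _ _ _ (by simp) ?_
              intro hp
              rcases List.cons_prefix_cons.mp hp with ⟨hk, hm⟩
              have hhd := singleton_prefix_head _ _ hm
              by_cases hp2 : ['k', 'g'] <+: (c2 :: rest)
              · rw [rep_pos _ _ _ (by simp) hp2,
                  rep_append_disj _ _ (by simp) _ _ disj_kg_km] at hhd
                simp at hhd
              · rw [rep_neg _ _ _ _ (by simp) hp2] at hhd
                have hc2 : c2 = 'm' :=
                  head_rep_ne _ _ (by simp) (by simp) (by decide) c2 _ hhd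
                exact h3 ⟨hk.symm, hc2⟩
            have hM : mPhase (c1 :: c2 :: rest) = c1 :: mPhase (c2 :: rest) := by
              rw [mPhase_eq, e1, e2, e3, ← mPhase_eq]
            rw [hM, show c1 :: mPhase (c2 :: rest) = [c1] ++ mPhase (c2 :: rest) from rfl,
              lPhase_append, lPhase_single, ih (c2 :: rest) hrest2]
            have hscan : bScan (c1 :: c2 :: rest) = bLetter c1 ++ bScan (c2 :: rest) := by
              have hbm : bMeasure c1 c2 = none := by
                simp [bMeasure, h1, h2, h3]
              simp [bScan, hbm]
            rw [hscan]

-- ===== VERDICT (by name: the statement is the Claim_ definition above) =====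
theorem eng_to_kor_spec : Claim_equal_eng_to_kor := by
  intro text _
  unfold Spec_eng_to_kor
  rw [eng_to_kor_eq, main_ind text.toList.length text.toList (le_refl _)]
  rfl
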